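-- pv_equiv track=rewrite | github.com/Andriy-Melya/NumberMind | app/game.py | is_norm
-- ===== SOURCE A (Python) =====
-- def is_norm(x, N):
--     try:
--         n = int(x)
--     except:
--         return False
--     if not(10 ** (N - 1) <= n <= 10 ** N):
--         return False
--     mas = []
--     while n > 0:
--         x = n % 10
--         n //= 10
--         if x in mas:
--             return False
--         else:
--             mas.append(x)
--     return True
-- ===== SOURCE B (Python) =====
-- def is_norm(x, N):
--     try:
--         n = int(x)
--     except:
--         return False
--     if not (10 ** (N - 1) <= n <= 10 ** N):
--         return False
--     s = str(n)
--     return len(set(s)) == len(s)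
-- ===== Notes on version B (the rewrite author's own statement) =====
-- stated objective: simpler
-- what changed: The digit-extraction while loop with %10 // 10 arithmetic and an incremental list-membership scan is replaced by a single set-cardinality test on str(n): len(set(s)) == len(s).
import Mathlib
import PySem

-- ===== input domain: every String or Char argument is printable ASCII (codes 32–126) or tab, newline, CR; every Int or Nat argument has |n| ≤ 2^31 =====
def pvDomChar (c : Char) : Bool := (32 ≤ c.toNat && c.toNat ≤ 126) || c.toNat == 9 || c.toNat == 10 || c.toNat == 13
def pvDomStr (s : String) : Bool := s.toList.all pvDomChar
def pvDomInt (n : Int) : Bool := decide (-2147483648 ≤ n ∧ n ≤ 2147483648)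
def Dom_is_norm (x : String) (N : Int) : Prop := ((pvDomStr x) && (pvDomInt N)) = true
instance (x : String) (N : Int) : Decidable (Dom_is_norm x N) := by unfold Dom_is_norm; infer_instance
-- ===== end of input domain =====

-- B replaces A's digit-extraction while loop and incremental list-membership scan by a
-- single set-cardinality test on str(n) (objective: simpler); same try/int and range check.


-- Shared helper (the range check '10 ** (N - 1) <= n <= 10 ** N' is the same source line in
-- both Pythons). Python's 10**e is an int for e ≥ 0; for e < 0 it is a float, and int/float
-- comparison is exact: that float is 0.0 exactly when e ≤ -324 (IEEE-754 underflow, checked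
-- against CPython) and otherwise lies strictly between 0 and 1, so for an int n
--   10**e <= n  ↔  (0 ≤ n  if e ≤ -324  else 1 ≤ n)   and   n <= 10**e  ↔  n ≤ 0.
def pyPow10Le (e n : Int) : Bool :=          -- 10 ** e <= n
  if 0 ≤ e then decide ((10:Int) ^ e.toNat ≤ n)
  else if e ≤ -324 then decide (0 ≤ n) else decide (1 ≤ n)
def pyLePow10 (n e : Int) : Bool :=          -- n <= 10 ** e
  if 0 ≤ e then decide (n ≤ (10:Int) ^ e.toNat) else decide (n ≤ 0)

-- ===== PORT A =====
-- the while loop: x = n % 10; n //= 10; if x in mas: return False; else: mas.append(x)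
def isNormLoop (n : Int) (mas : List Int) : Bool :=
  if _h : 0 < n then
    let x := PySem.Int.mod n 10
    let n' := PySem.Int.floordiv n 10
    if x ∈ mas then false else isNormLoop n' (mas ++ [x])
  else true
termination_by n.toNat
decreasing_by
  have h10 : PySem.Int.floordiv n 10 = n / 10 := PySem.Int.floordiv_eq_ediv_of_pos (by omega)
  simp only [h10]; omega

def is_norm (x : String) (N : Int) : Bool :=
  match PySem.Int.ofStr? x with
  | none => false                                    -- except: return False
  | some n =>
    if !(pyPow10Le (N - 1) n && pyLePow10 n N) then false
    else isNormLoop n []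

-- ===== PORT B =====
def is_norm_alt (x : String) (N : Int) : Bool :=
  match PySem.Int.ofStr? x with
  | none => false                                    -- except: return False
  | some n =>
    if !(pyPow10Le (N - 1) n && pyLePow10 n N) then false
    else
      let s := PySem.Int.toStr n                     -- s = str(n)
      PySem.Set.len (PySem.Set.ofList s.toList) == PySem.Str.len s   -- len(set(s)) == len(s)

-- ===== PRECONDITION & SPEC =====
def Spec_is_norm (x : String) (N : Int) (out : Bool) : Prop := out = is_norm_alt x N
instance (x : String) (N : Int) (out : Bool) : Decidable (Spec_is_norm x N out) := by unfold Spec_is_norm; infer_instance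

-- ===== CLAIM (what is proved, stated in full; the proofs are below) =====
def Claim_equal_is_norm : Prop := ∀ (x : String) (N : Int), Dom_is_norm x N → Spec_is_norm x N (is_norm x N)

-- ===== LEMMAS AND PROOFS =====

-- the low-to-high digit list A's loop walks (empty for 0)
def pvDigits (m : Nat) : List Nat :=
  if m = 0 then [] else m % 10 :: pvDigits (m / 10)
decreasing_by omega

theorem pvDigits_lt_ten (m : Nat) : ∀ d ∈ pvDigits m, d < 10 := by
  induction m using Nat.strong_induction_on with
  | _ m ih =>
    unfold pvDigits
    split
    · simp
    · rename_i h0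
      intro d hd
      rcases List.mem_cons.mp hd with h | h
      · omega
      · exact ih (m / 10) (by omega) d h

-- A's loop returns True iff the digits are distinct and avoid mas
theorem isNormLoop_iff (m : Nat) : ∀ mas : List Int,
    (isNormLoop (m : Int) mas = true ↔
      ((pvDigits m).map (fun d : Nat => (d : Int))).Nodup ∧
        ∀ d ∈ (pvDigits m).map (fun d : Nat => (d : Int)), d ∉ mas) := by
  induction m using Nat.strong_induction_on with
  | _ m ih =>
    intro mas
    by_cases h0 : m = 0
    · subst h0
      unfold isNormLoop
      rw [pvDigits]
      simp
    · have hpos : (0:Int) < (m:Int) := by exact_mod_cast Nat.pos_of_ne_zero h0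
      have hmod : PySem.Int.mod ((m:Int)) 10 = ((m % 10 : Nat) : Int) := by
        exact_mod_cast PySem.Int.mod_natCast m 10
      have hdiv : PySem.Int.floordiv ((m:Int)) 10 = ((m / 10 : Nat) : Int) := by
        exact_mod_cast PySem.Int.floordiv_natCast m 10
      unfold isNormLoop
      rw [pvDigits, dif_pos hpos]
      simp only [hmod, hdiv, if_neg h0]
      by_cases hmem : ((m % 10 : Nat) : Int) ∈ mas
      · simp only [if_pos hmem]
        constructor
        · intro h; cases h
        · rintro ⟨-, hall⟩
          exact absurd hmem (hall _ (by simp))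
      · rw [if_neg hmem]
        rw [ih (m / 10) (by omega) (mas ++ [((m % 10 : Nat) : Int)])]
        have hx : ∀ d : Int, d ∈ mas ++ [((m % 10 : Nat) : Int)] ↔ d ∈ mas ∨ d = ((m % 10 : Nat) : Int) := by
          intro d; simp
        simp only [List.map_cons, List.nodup_cons]
        constructor
        · rintro ⟨hnd, hall⟩
          refine ⟨⟨?_, hnd⟩, ?_⟩
          · intro hin
            have hni := hall _ hin
            rw [hx] at hni
            exact hni (Or.inr rfl)
          · rw [List.forall_mem_cons]
            refine ⟨hmem, ?_⟩
            intro d hd hdmas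
            have hni := hall _ hd
            rw [hx] at hni
            exact hni (Or.inl hdmas)
        · rintro ⟨⟨hhead, hnd⟩, hall⟩
          rw [List.forall_mem_cons] at hall
          refine ⟨hnd, ?_⟩
          intro d hd
          rw [hx]
          rintro (hdm | rfl)
          · exact hall.2 d hd hdm
          · exact hhead hd

-- 0 ≤ n whenever the range check passes (the lower bound is ≥ 0 in every branch)
theorem nonneg_of_pow10Le (e n : Int) (h : pyPow10Le e n = true) : 0 ≤ n := by
  unfold pyPow10Le at h
  split at h
  · have hp : (0:Int) < 10 ^ e.toNat := by positivity
    have hle := of_decide_eq_true h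
    linarith
  · split at h <;> (have := of_decide_eq_true h; omega)

-- Nat.toDigits, characterised: the reversed digit list rendered through Nat.digitChar
def pvRep (m : Nat) : List Nat := if m = 0 then [0] else pvDigits m

theorem toDigitsCore_eq (f : Nat) : ∀ (m : Nat) (ds : List Char), m < 10 ^ f → 0 < f →
    Nat.toDigitsCore 10 f m ds = ((pvRep m).map Nat.digitChar).reverse ++ ds := by
  induction f with
  | zero => intro m ds h hf; omega
  | succ f ih =>
    intro m ds h hf
    show (if m / 10 = 0 then (m % 10).digitChar :: ds
          else Nat.toDigitsCore 10 f (m / 10) ((m % 10).digitChar :: ds)) = _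
    by_cases hq : m / 10 = 0
    · have hm : m < 10 := by omega
      rw [if_pos hq]
      unfold pvRep
      by_cases h0 : m = 0
      · simp [h0]
      · have hd : pvDigits m = m % 10 :: pvDigits (m / 10) := by rw [pvDigits]; exact if_neg h0
        have hd2 : pvDigits (m / 10) = [] := by rw [pvDigits]; exact if_pos hq
        rw [if_neg h0, hd, hd2]
        simp [Nat.mod_eq_of_lt hm]
    · have h0 : ¬ m = 0 := by omega
      have hd : pvDigits m = m % 10 :: pvDigits (m / 10) := by rw [pvDigits]; exact if_neg h0
      have hps : (10:Nat) ^ (f + 1) = 10 * 10 ^ f := by ring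
      have hfpos : 0 < f := by
        rcases Nat.eq_zero_or_pos f with hf0 | hf0
        · subst hf0; omega
        · exact hf0
      rw [if_neg hq, ih (m / 10) _ (by omega) hfpos]
      unfold pvRep
      rw [if_neg h0, if_neg hq, hd]
      simp

theorem toDigits_eq (m : Nat) :
    Nat.toDigits 10 m = ((pvRep m).map Nat.digitChar).reverse := by
  have h : m < 10 ^ (m + 1) := by
    calc m < 2 ^ m := Nat.lt_two_pow_self
    _ ≤ 10 ^ m := Nat.pow_le_pow_left (by omega) _
    _ ≤ 10 ^ (m + 1) := Nat.pow_le_pow_right (by omega) (by omega)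
  simpa using toDigitsCore_eq (m + 1) m [] h (by omega)

-- set-cardinality = length  ↔  no duplicates
theorem ofList_len_eq_iff {α : Type} [DecidableEq α] [BEq α] [LawfulBEq α] (l : List α) :
    ((PySem.Set.ofList l).length = l.length ↔ l.Nodup) := by
  constructor
  · intro h
    have hperm : (PySem.Set.ofList l).Perm l.dedup := by
      refine (List.perm_ext_iff_of_nodup (PySem.Set.nodup_ofList l) l.nodup_dedup).mpr ?_
      intro a
      rw [PySem.Set.mem_ofList, List.mem_dedup]
    have hlen : l.dedup.length = l.length := by
      rw [← hperm.length_eq, h]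
    have : l.dedup = l := l.dedup_sublist.eq_of_length hlen
    rw [← this]; exact l.nodup_dedup
  · intro h
    rw [PySem.Set.ofList_eq_self_of_nodup l h]

theorem digitChar_nodup_iff (l : List Nat) (hl : ∀ d ∈ l, d < 10) :
    ((l.map Nat.digitChar).Nodup ↔ l.Nodup) := by
  constructor
  · exact fun h => List.Nodup.of_map _ h
  · intro h
    refine h.map_on ?_
    have key : ∀ a < 10, ∀ b < 10, Nat.digitChar a = Nat.digitChar b → a = b := by decide
    intro a ha b hb
    exact key a (hl a ha) b (hl b hb)

-- the core: for 0 ≤ n, A's loop agrees with B's set-cardinality test on str(n)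
theorem core_eq (n : Int) (hn : 0 ≤ n) :
    isNormLoop n [] =
      (PySem.Set.len (PySem.Set.ofList (PySem.Int.toStr n).toList) ==
        PySem.Str.len (PySem.Int.toStr n)) := by
  obtain ⟨m, rfl⟩ : ∃ m : Nat, n = (m : Int) := ⟨n.toNat, (Int.toNat_of_nonneg hn).symm⟩
  have hchars : (PySem.Int.toStr (m : Int)).toList = ((pvRep m).map Nat.digitChar).reverse := by
    rw [PySem.Int.toList_toStr]
    unfold PySem.Int.toChars
    rw [if_neg (by omega)]
    simpa using toDigits_eq m
  rw [Bool.eq_iff_iff, isNormLoop_iff m []]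
  simp only [List.not_mem_nil, not_false_iff, implies_true, and_true]
  rw [PySem.Str.len, PySem.Set.len, beq_iff_eq, Int.natCast_inj, ofList_len_eq_iff, hchars,
    List.nodup_reverse, digitChar_nodup_iff _ ?side]
  case side =>
    unfold pvRep
    split
    · simp
    · exact pvDigits_lt_ten m
  rw [List.nodup_map_iff (fun a b => by exact_mod_cast id)]
  unfold pvRep
  split
  · rename_i h0; subst h0; rw [pvDigits]; simp
  · exact Iff.rfl

-- ===== VERDICT (by name: the statement is the Claim_ definition above) =====
theorem is_norm_spec : Claim_equal_is_norm := by
  intro x N _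
  unfold Spec_is_norm is_norm is_norm_alt
  cases hs : PySem.Int.ofStr? x with
  | none => rfl
  | some n =>
    by_cases hr : (pyPow10Le (N - 1) n && pyLePow10 n N) = true
    · have hnn : 0 ≤ n := by
        have h1 := hr
        simp only [Bool.and_eq_true] at h1
        exact nonneg_of_pow10Le (N - 1) n h1.1
      simp only [hr, Bool.not_true, Bool.false_eq_true, if_false]
      exact core_eq n hnn
    · have hr' : (pyPow10Le (N - 1) n && pyLePow10 n N) = false := by
        simpa using hr
      simp [hr']
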